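-- pv_equiv track=rewrite | github.com/HAIDEJIANG/bababot-workspace | rfq_best_quote_match.py | find_best_quote
-- ===== SOURCE A (Python) =====
-- def find_best_quote(part_number, quotes):
--     """为零件号找到最优报价"""
--     matches = []
--     pn_upper = part_number.upper().strip()
--
--     for q in quotes:
--         quote_pn = q.get('PN', '').upper().strip()
--         # 精确匹配或部分匹配
--         if pn_upper == quote_pn or pn_upper in quote_pn or quote_pn in pn_upper:
--             matches.append(q)
--
--     if not matches:
--         return None
--
--     # 优先返回有价格的
--     for m in matches:
--         if m.get('Price') and m['Price'] not in ['待报价', '待确认']: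
--             return m
--
--     return matches[0] if matches else None
-- ===== SOURCE B (Python) =====
-- def find_best_quote(part_number, quotes):
--     """为零件号找到最优报价 — single pass, no matches list."""
--     pn_upper = part_number.upper().strip()
--     first_match = None
--     first_valid = None
--     for q in quotes:
--         quote_pn = q.get('PN', '').upper().strip()
--         if pn_upper == quote_pn or pn_upper in quote_pn or quote_pn in pn_upper:
--             if first_match is None:
--                 first_match = q
--             if first_valid is None and q.get('Price') and q['Price'] not in ['待报价', '待确认']:
--                 first_valid = q
--     return first_valid if first_valid is not None else first_match
-- ===== Notes on version B (the rewrite author's own statement) =====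
-- stated objective: alternative
-- what changed: Replaced the two-phase algorithm (build a matches list, then rescan it for the first priced quote) with a single pass over quotes that maintains two write-once scalars, first_match and first_valid, and never materialises the matches list.
import Mathlib
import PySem

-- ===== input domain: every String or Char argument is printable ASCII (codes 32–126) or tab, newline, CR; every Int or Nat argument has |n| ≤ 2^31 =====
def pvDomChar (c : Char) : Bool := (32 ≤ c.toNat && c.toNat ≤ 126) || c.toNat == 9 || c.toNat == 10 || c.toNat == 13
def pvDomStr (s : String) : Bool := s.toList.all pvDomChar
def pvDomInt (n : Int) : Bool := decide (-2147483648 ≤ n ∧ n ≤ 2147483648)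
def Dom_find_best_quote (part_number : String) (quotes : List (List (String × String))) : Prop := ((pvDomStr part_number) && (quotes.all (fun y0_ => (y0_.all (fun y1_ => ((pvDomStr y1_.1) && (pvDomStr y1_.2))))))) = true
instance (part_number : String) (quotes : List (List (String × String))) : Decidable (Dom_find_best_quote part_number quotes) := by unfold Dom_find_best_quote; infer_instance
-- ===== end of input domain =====

-- B is an alternative decomposition: one pass with two write-once scalars instead of
-- building a matches list and rescanning it. Equivalence is about the return value.

-- shared helpers (same-module style): normalization, the PN match test, the price test
def pvNorm (s : String) : String := PySem.Str.strip (PySem.Str.upper s)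

def pvIsMatch (pnu : String) (q : List (String × String)) : Bool :=
  let quote_pn := pvNorm (PySem.Dict.getD (PySem.Dict.mk q) "PN" "")
  pnu == quote_pn || PySem.Str.isIn pnu quote_pn || PySem.Str.isIn quote_pn pnu

def pvValidPrice (m : List (String × String)) : Bool :=
  let p := PySem.Dict.getD (PySem.Dict.mk m) "Price" ""   -- '' is falsy, so getD '' captures m.get('Price') truthiness
  p != "" && p != "待报价" && p != "待确认"

-- ===== PORT A =====
def find_best_quote (part_number : String) (quotes : List (List (String × String))) : Option (List (String × String)) :=
  let pn_upper := pvNorm part_number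
  let ms := quotes.foldl (fun acc q => if pvIsMatch pn_upper q then acc ++ [q] else acc) []
  if ms.isEmpty then none
  else
    match ms.find? pvValidPrice with   -- 'for m in matches: if …: return m'
    | some m => some m
    | none => ms.head?                 -- 'matches[0] if matches else None'

-- ===== PORT B =====
def find_best_quote_alt (part_number : String) (quotes : List (List (String × String))) : Option (List (String × String)) :=
  let pn_upper := pvNorm part_number
  let s := quotes.foldl
    (fun (s : Option (List (String × String)) × Option (List (String × String))) q =>
      if pvIsMatch pn_upper q then
        ((match s.1 with | none => some q | some m => some m),
         (match s.2 with
          | none => if pvValidPrice q then some q else none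
          | some v => some v))
      else s)
    (none, none)
  match s.2 with
  | some v => some v
  | none => s.1

-- ===== PRECONDITION & SPEC =====
def Spec_find_best_quote (part_number : String) (quotes : List (List (String × String))) (out : Option (List (String × String))) : Prop := out = find_best_quote_alt part_number quotes
instance (part_number : String) (quotes : List (List (String × String))) (out : Option (List (String × String))) : Decidable (Spec_find_best_quote part_number quotes out) := by unfold Spec_find_best_quote; infer_instance

-- ===== CLAIM (what is proved, stated in full; the proofs are below) =====
def Claim_equal_find_best_quote : Prop := ∀ (part_number : String) (quotes : List (List (String × String))), Dom_find_best_quote part_number quotes → Spec_find_best_quote part_number quotes (find_best_quote part_number quotes)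

-- ===== LEMMAS AND PROOFS =====

-- B's loop invariant: after folding over qs, the pair holds the already-found values
-- or else the first (resp. first valid) match within qs.
theorem pvB_fold (u : String) (qs : List (List (String × String)))
    (fm fv : Option (List (String × String))) :
    qs.foldl
      (fun (s : Option (List (String × String)) × Option (List (String × String))) q =>
        if pvIsMatch u q then
          ((match s.1 with | none => some q | some m => some m),
           (match s.2 with
            | none => if pvValidPrice q then some q else none
            | some v => some v))
        else s)
      (fm, fv)
    = (fm.or ((qs.filter (pvIsMatch u)).head?),
       fv.or ((qs.filter (pvIsMatch u)).find? pvValidPrice)) := by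
  induction qs generalizing fm fv with
  | nil => cases fm <;> cases fv <;> simp
  | cons q t ih =>
    by_cases hq : pvIsMatch u q
    · simp only [List.foldl_cons, List.filter_cons, hq, if_pos, List.find?]
      rw [ih]
      cases fm <;> cases fv <;> by_cases hv : pvValidPrice q <;> simp [hv, Option.or]
    · simp only [List.foldl_cons, List.filter_cons, hq, if_neg, Bool.false_eq_true,
        not_false_eq_true]
      rw [ih]

theorem find_best_quote_eq_alt (part_number : String) (quotes : List (List (String × String))) :
    find_best_quote part_number quotes = find_best_quote_alt part_number quotes := by
  unfold find_best_quote find_best_quote_alt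
  simp only [PySem.List.foldl_append_if_eq_filter, pvB_fold, List.nil_append, Option.or]
  cases h : quotes.filter (pvIsMatch (pvNorm part_number)) with
  | nil => simp
  | cons m t => cases (m :: t).find? pvValidPrice <;> simp

-- ===== VERDICT (by name: the statement is the Claim_ definition above) =====
theorem find_best_quote_spec : Claim_equal_find_best_quote := by
  intro pn qs _
  exact find_best_quote_eq_alt pn qs
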